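-- pv_equiv track=rewrite | github.com/hexronuspi/utilityCheck | ucheck/rank/weightrank.py | is_utility_file_or_folder
-- ===== SOURCE A (Python) =====
-- def is_utility_file_or_folder(file_path: str) -> bool:
--     """
--     Check if the function is from a utility file or folder.
--     Returns True if the file path contains 'util', 'utils', or 'utility' in any part.
--     """
--     if not file_path:
--         return False
--
--     # Convert to lowercase for case-insensitive matching
--     path_lower = file_path.lower()
--
--     # Split the path by common separators to check each component
--     path_components = path_lower.replace('\\', '/').split('/')
--
--     # Check if any component contains utility-related names
--     utility_names = ['util', 'utils', 'utility']
--
--     for component in path_components: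
--         # Remove file extensions for checking
--         component_base = component.split('.')[0]
--
--         # Check if the component is exactly one of the utility names
--         if component_base in utility_names:
--             return True
--
--         # Check if the component contains utility names as substrings
--         for util_name in utility_names:
--             if util_name in component_base:
--                 return True
--
--     return False
-- ===== SOURCE B (Python) =====
-- def is_utility_file_or_folder(file_path: str) -> bool:
--     """Single left-to-right scan: a 'blocked' flag records whether a '.' has been
--     seen since the last path separator; 'util' found at an unblocked position
--     means it lies before the first dot of its component."""
--     s = file_path.lower().replace('\\', '/')
--     blocked = False
--     for i in range(len(s)):
--         c = s[i]
--         if c == '/':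
--             blocked = False
--         elif c == '.':
--             blocked = True
--         elif not blocked and s.startswith('util', i):
--             return True
--     return False
-- ===== Notes on version B (the rewrite author's own statement) =====
-- stated objective: alternative
-- what changed: Replaces the split-into-components / strip-extension / three-name nested membership loops by a single left-to-right scan that keeps a 'seen a dot since the last separator' flag and tests for the one substring 'util' (which subsumes 'utils'/'utility' and the exact-match branch) at each unblocked position.
import Mathlib
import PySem

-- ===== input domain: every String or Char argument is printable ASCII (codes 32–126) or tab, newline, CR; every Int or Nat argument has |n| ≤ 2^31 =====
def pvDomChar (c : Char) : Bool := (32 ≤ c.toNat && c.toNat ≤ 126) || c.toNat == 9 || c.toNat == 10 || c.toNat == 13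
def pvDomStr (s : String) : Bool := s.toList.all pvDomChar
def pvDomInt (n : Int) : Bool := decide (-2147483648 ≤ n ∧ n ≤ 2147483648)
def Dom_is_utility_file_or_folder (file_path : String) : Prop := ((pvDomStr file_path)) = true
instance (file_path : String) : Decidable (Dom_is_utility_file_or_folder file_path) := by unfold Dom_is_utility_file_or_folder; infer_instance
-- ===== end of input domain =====

-- B replaces A's split-into-components / strip-extension / three-name nested loops by a
-- single left-to-right scan with a "dot seen since the last separator" flag testing the one
-- substring 'util' (objective: alternative — structurally different, same asymptotic cost).

-- ===== PORT A =====
def is_utility_file_or_folder (file_path : String) : Bool :=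
  if file_path = "" then false
  else
    let path_lower := PySem.Chars.lower file_path.toList
    let path_components := PySem.Chars.splitOn (PySem.Chars.replace path_lower "\\".toList "/".toList) "/".toList
    let utility_names := ["util".toList, "utils".toList, "utility".toList]
    path_components.any (fun component =>
      -- component.split('.')[0]: split never returns an empty list, so the [0] never raises
      let component_base := (PySem.List.pyGet? (PySem.Chars.splitOn component ".".toList) 0).getD []
      utility_names.contains component_base ||
      utility_names.any (fun util_name => PySem.Chars.isIn util_name component_base))

-- ===== PORT B =====
-- the indexed loop `for i in range(len(s))` with flag `blocked`; `s.startswith('util', i)`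
-- reads the suffix starting at i, i.e. the list c :: rest
def altScan (s : List Char) (blocked : Bool) : Bool :=
  match s with
  | [] => false
  | c :: rest =>
    if c = '/' then altScan rest false
    else if c = '.' then altScan rest true
    else if !blocked && "util".toList.isPrefixOf (c :: rest) then true
    else altScan rest blocked

def is_utility_file_or_folder_alt (file_path : String) : Bool :=
  altScan (PySem.Chars.replace (PySem.Chars.lower file_path.toList) "\\".toList "/".toList) false

-- ===== PRECONDITION & SPEC =====
def Spec_is_utility_file_or_folder (file_path : String) (out : Bool) : Prop := out = is_utility_file_or_folder_alt file_path
instance (file_path : String) (out : Bool) : Decidable (Spec_is_utility_file_or_folder file_path out) := by unfold Spec_is_utility_file_or_folder; infer_instance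

-- ===== CLAIM (what is proved, stated in full; the proofs are below) =====
def Claim_equal_is_utility_file_or_folder : Prop := ∀ (file_path : String), Dom_is_utility_file_or_folder file_path → Spec_is_utility_file_or_folder file_path (is_utility_file_or_folder file_path)

-- ===== LEMMAS AND PROOFS =====

-- pure-recursion model of Python's split(sep) for a single-char separator
def splitAuxC (sc : Char) (l : List Char) : List (List Char) :=
  if h : (l.dropWhile (· ≠ sc)) = [] then [l.takeWhile (· ≠ sc)]
  else l.takeWhile (· ≠ sc) :: splitAuxC sc (l.dropWhile (· ≠ sc)).tail
termination_by l.length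
decreasing_by
  have hle := List.length_dropWhile_le (fun c => decide (c ≠ sc)) l
  cases hdw : l.dropWhile (fun c => decide (c ≠ sc)) with
  | nil => exact absurd hdw h
  | cons x xs => rw [hdw] at hle; simp at hle ⊢; omega

theorem splitAuxC_eq_cons (sc : Char) (l : List Char) :
    splitAuxC sc l = l.takeWhile (· ≠ sc) :: (splitAuxC sc l).tail := by
  rw [splitAuxC]
  split_ifs <;> simp

theorem splitAuxC_cons_sep (sc : Char) (rest : List Char) :
    splitAuxC sc (sc :: rest) = [] :: splitAuxC sc rest := by
  conv_lhs => rw [splitAuxC]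
  have hdw : (sc :: rest).dropWhile (· ≠ sc) = sc :: rest := by
    simp [List.dropWhile_cons]
  rw [dif_neg (by simp [hdw])]
  simp [hdw, List.takeWhile_cons]

theorem splitAuxC_cons_ne (sc c : Char) (rest : List Char) (h : c ≠ sc) :
    splitAuxC sc (c :: rest) = (c :: rest.takeWhile (· ≠ sc)) :: (splitAuxC sc rest).tail := by
  have h1 : (c :: rest).dropWhile (· ≠ sc) = rest.dropWhile (· ≠ sc) := by
    simp [List.dropWhile_cons, h]
  conv_lhs => rw [splitAuxC]
  conv_rhs => rw [splitAuxC]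
  rw [h1]
  split_ifs with h2 <;> simp [List.takeWhile_cons, h]

theorem splitAuxC_tail_cons_ne (sc c : Char) (rest : List Char) (h : c ≠ sc) :
    (splitAuxC sc (c :: rest)).tail = (splitAuxC sc rest).tail := by
  rw [splitAuxC_cons_ne sc c rest h, List.tail_cons]

def consFirst (pre : List Char) : List (List Char) → List (List Char)
  | [] => [pre]
  | x :: xs => (pre ++ x) :: xs

theorem splitOn_go_eq (sc : Char) (fuel : Nat) :
    ∀ (l cur : List Char) (acc : List (List Char)), l.length < fuel →
      PySem.Chars.splitOn.go [sc] fuel l cur acc = acc.reverse ++ consFirst cur.reverse (splitAuxC sc l) := by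
  induction fuel with
  | zero => intro l cur acc h; omega
  | succ n ih =>
    intro l cur acc h
    match l with
    | [] =>
      rw [PySem.Chars.splitOn.go]
      · have : splitAuxC sc [] = [[]] := by rw [splitAuxC]; simp
        simp [this, consFirst]
      · omega
    | c :: rest =>
      rw [PySem.Chars.splitOn.go]
      by_cases hc : sc = c
      · subst hc
        rw [if_pos (by simp [List.isPrefixOf])]
        rw [(by simp : List.drop ([sc].length) (sc :: rest) = rest)]
        rw [ih rest [] (cur.reverse :: acc) (by simp at h; omega)]
        rw [splitAuxC_cons_sep]
        rw [splitAuxC_eq_cons sc rest]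
        simp [consFirst]
      · rw [if_neg (by simp [List.isPrefixOf]; intro hh; exact hc hh)]
        rw [ih rest (c :: cur) acc (by simp at h; omega)]
        rw [splitAuxC_cons_ne sc c rest (fun hh => hc hh.symm)]
        rw [splitAuxC_eq_cons sc rest]
        simp [consFirst]

theorem splitOn_eq_splitAuxC (sc : Char) (l : List Char) :
    PySem.Chars.splitOn l [sc] = splitAuxC sc l := by
  unfold PySem.Chars.splitOn
  rw [splitOn_go_eq sc (l.length + 1) l [] [] (by omega)]
  rw [splitAuxC_eq_cons sc l]
  simp [consFirst]

-- the per-component check of both programs: "util" occurs before the first '.'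
def compCheck (comp : List Char) : Bool :=
  PySem.Chars.isIn "util".toList (comp.takeWhile (· ≠ '.'))

theorem compCheck_nil : compCheck [] = false := by decide

theorem compCheck_dot (xs : List Char) : compCheck ('.' :: xs) = false := by
  unfold compCheck
  rw [List.takeWhile_cons, if_neg (by decide)]
  decide

-- a pattern whose characters all satisfy q matches a prefix of takeWhile q l iff it matches a prefix of l
theorem isPrefixOf_takeWhile (q : Char → Bool) :
    ∀ (p l : List Char), (∀ c ∈ p, q c = true) → p.isPrefixOf (l.takeWhile q) = p.isPrefixOf l := by
  intro p
  induction p with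
  | nil => intro l _; simp [List.isPrefixOf]
  | cons c p' ih =>
    intro l hp
    match l with
    | [] => simp
    | a :: l' =>
      by_cases hq : q a = true
      · rw [List.takeWhile_cons, if_pos hq, List.isPrefixOf_cons₂, List.isPrefixOf_cons₂]
        exact congrArg (c == a && ·) (ih l' (fun d hd => hp d (List.mem_cons_of_mem c hd)))
      · have hca : (c == a) = false := by
          rcases hbe : c == a with _ | _
          · rfl
          · exact absurd (beq_iff_eq.mp hbe ▸ hp c List.mem_cons_self) hq
        rw [List.takeWhile_cons, if_neg hq, List.isPrefixOf_cons₂]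
        simp [List.isPrefixOf, hca]

theorem util_prefix_cons_takeWhile (c : Char) (rest : List Char) (q : Char → Bool)
    (hq : ∀ d ∈ "til".toList, q d = true) :
    "util".toList.isPrefixOf (c :: rest.takeWhile q) = "util".toList.isPrefixOf (c :: rest) := by
  show ('u' :: "til".toList).isPrefixOf (c :: rest.takeWhile q) =
    ('u' :: "til".toList).isPrefixOf (c :: rest)
  rw [List.isPrefixOf_cons₂, List.isPrefixOf_cons₂,
    isPrefixOf_takeWhile q "til".toList rest hq]

theorem isIn_util_cons (c : Char) (xs : List Char) :
    PySem.Chars.isIn "util".toList (c :: xs) =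
      ("util".toList.isPrefixOf (c :: xs) || PySem.Chars.isIn "util".toList xs) := by
  rcases h1 : PySem.Chars.isIn "util".toList (c :: xs) with _ | _
  · have h2 := (PySem.Chars.isIn_eq_false_iff _ _).mp h1
    rw [List.infix_cons_iff] at h2
    push_neg at h2
    rw [((PySem.Chars.isIn_eq_false_iff _ _).mpr h2.2 : _ = false)]
    have h3 : "util".toList.isPrefixOf (c :: xs) = false := by
      rcases hb2 : "util".toList.isPrefixOf (c :: xs) with _ | _
      · rfl
      · exact absurd (List.isPrefixOf_iff_prefix.mp hb2) h2.1
    rw [h3]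
    rfl
  · have h2 := (PySem.Chars.isIn_iff_infix _ _).mp h1
    rw [List.infix_cons_iff] at h2
    rcases h2 with hpre | hinf
    · rw [(List.isPrefixOf_iff_prefix.mpr hpre : _ = true)]; rfl
    · rw [((PySem.Chars.isIn_iff_infix _ _).mpr hinf : _ = true)]; simp

set_option maxRecDepth 4096 in
theorem compCheck_cons (c : Char) (rest : List Char) (hc : ¬c = '/') (hd : ¬c = '.') :
    compCheck (c :: rest.takeWhile (· ≠ '/')) =
      ("util".toList.isPrefixOf (c :: rest) || compCheck (rest.takeWhile (· ≠ '/'))) := by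
  unfold compCheck
  rw [List.takeWhile_cons, if_pos (by simp [hd]), isIn_util_cons, List.takeWhile_takeWhile,
    util_prefix_cons_takeWhile c rest _
      (by intro d hd; simp at hd; rcases hd with rfl | rfl | rfl <;> decide)]

theorem altScan_eq (l : List Char) (b : Bool) :
    altScan l b =
      ((!b && compCheck (l.takeWhile (· ≠ '/'))) ||
        (splitAuxC '/' l).tail.any compCheck) := by
  induction l generalizing b with
  | nil =>
    have h0 : splitAuxC '/' [] = [[]] := by rw [splitAuxC]; simp
    simp [altScan, h0, compCheck_nil]
  | cons c rest ih =>
    by_cases hc : c = '/'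
    · subst hc
      have h1 : altScan ('/' :: rest) b = altScan rest false := by
        simp [altScan]
      rw [h1, ih false, splitAuxC_cons_sep, List.tail_cons, List.takeWhile_cons,
        if_neg (by decide), compCheck_nil]
      conv_rhs => rw [splitAuxC_eq_cons '/' rest]
      simp [List.any_cons]
    · rw [List.takeWhile_cons, if_pos (by simp [hc]), splitAuxC_tail_cons_ne '/' c rest hc]
      by_cases hd : c = '.'
      · subst hd
        have h1 : altScan ('.' :: rest) b = altScan rest true := by
          simp [altScan, hc]
        rw [h1, ih true, compCheck_dot]
        simp
      · have h1 : altScan (c :: rest) b =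
            (if !b && "util".toList.isPrefixOf (c :: rest) then true else altScan rest b) := by
          simp only [altScan, if_neg hc, if_neg hd]
        rw [h1, ih b, compCheck_cons c rest hc hd]
        cases b
        · cases hpre : "util".toList.isPrefixOf (c :: rest) <;> simp [hpre, Bool.or_assoc]
        · simp

-- A's five-way disjunction per component collapses to compCheck
theorem perComp_eq (component : List Char) :
    (["util".toList, "utils".toList, "utility".toList].contains
        ((PySem.List.pyGet? (PySem.Chars.splitOn component ".".toList) 0).getD []) ||
     ["util".toList, "utils".toList, "utility".toList].any
        (fun util_name => PySem.Chars.isIn util_name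
          ((PySem.List.pyGet? (PySem.Chars.splitOn component ".".toList) 0).getD []))) = compCheck component := by
  have hsplit : PySem.Chars.splitOn component ".".toList = splitAuxC '.' component :=
    splitOn_eq_splitAuxC '.' component
  simp only [hsplit]
  rw [splitAuxC_eq_cons '.' component]
  have hget : (PySem.List.pyGet? (component.takeWhile (· ≠ '.') ::
      (splitAuxC '.' component).tail) 0).getD [] = component.takeWhile (· ≠ '.') := by
    simp [PySem.List.pyGet?, PySem.List.pyIdx?]
  simp only [hget]
  set base := component.takeWhile (· ≠ '.') with hbase
  unfold compCheck
  rw [← hbase]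
  rcases h1 : PySem.Chars.isIn "util".toList base with _ | _
  · have hninf := (PySem.Chars.isIn_eq_false_iff _ _).mp h1
    have hne : ∀ t : List Char, "util".toList <:+: t → (base == t) = false := by
      intro t ht
      rcases hbe : base == t with _ | _
      · rfl
      · exact absurd (beq_iff_eq.mp hbe ▸ ht) hninf
    have hsub : ∀ t : List Char, "util".toList <:+: t →
        PySem.Chars.isIn t base = false := by
      intro t ht
      rcases hh : PySem.Chars.isIn t base with _ | _
      · rfl
      · exact absurd (List.IsInfix.trans ht ((PySem.Chars.isIn_iff_infix _ _).mp hh)) hninf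
    simp only [List.contains_cons, List.contains_nil, List.any_cons, List.any_nil,
      hne _ (by decide : "util".toList <:+: "util".toList),
      hne _ (by decide : "util".toList <:+: "utils".toList),
      hne _ (by decide : "util".toList <:+: "utility".toList),
      h1, hsub _ (by decide : "util".toList <:+: "utils".toList),
      hsub _ (by decide : "util".toList <:+: "utility".toList)]
    decide
  · simp only [List.any_cons, h1]
    simp

-- ===== VERDICT (by name: the statement is the Claim_ definition above) =====
theorem is_utility_file_or_folder_spec : Claim_equal_is_utility_file_or_folder := by
  intro file_path _
  unfold Spec_is_utility_file_or_folder
  by_cases hempty : file_path = ""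
  · subst hempty; decide
  · simp only [is_utility_file_or_folder, is_utility_file_or_folder_alt, if_neg hempty]
    generalize (PySem.Chars.replace (PySem.Chars.lower file_path.toList) "\\".toList "/".toList) = r
    have hsplit : PySem.Chars.splitOn r "/".toList = splitAuxC '/' r :=
      splitOn_eq_splitAuxC '/' r
    rw [hsplit, altScan_eq r false,
      List.any_congr rfl (fun comp => perComp_eq comp)]
    conv_lhs => rw [splitAuxC_eq_cons '/' r]
    rw [List.any_cons]
    simp
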